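-- pv_equiv track=rewrite | github.com/ignaciocruzg/BAZ-example | main.py | contar_rocky_sparky
-- ===== SOURCE A (Python) =====
-- def contar_rocky_sparky(diccionario):
--     # Mi solucion
--     contador_rocky = 0
--     contador_sparky = 0
--
--     for elemento in diccionario.values():
--         if elemento == 'Rocky':
--             contador_rocky += 1
--         elif elemento == 'Sparky':
--             contador_sparky += 1
--
--     return "Rocky: " + str(contador_rocky), "Sparky: " + str(contador_sparky)
-- ===== SOURCE B (Python) =====
-- def contar_rocky_sparky(diccionario):
--     # Sort the values once, then count each target by binary-searching its
--     # run boundaries (bisect_right - bisect_left) in the sorted list.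
--     vals = sorted(diccionario.values())
--
--     def bl(a, x):
--         lo, hi = 0, len(a)
--         while lo < hi:
--             mid = (lo + hi) // 2
--             if a[mid] < x:
--                 lo = mid + 1
--             else:
--                 hi = mid
--         return lo
--
--     def br(a, x):
--         lo, hi = 0, len(a)
--         while lo < hi:
--             mid = (lo + hi) // 2
--             if x < a[mid]:
--                 hi = mid
--             else:
--                 lo = mid + 1
--         return lo
--
--     r = br(vals, 'Rocky') - bl(vals, 'Rocky')
--     s = br(vals, 'Sparky') - bl(vals, 'Sparky')
--     return "Rocky: " + str(r), "Sparky: " + str(s)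
-- ===== Notes on version B (the rewrite author's own statement) =====
-- stated objective: alternative
-- what changed: Replaces the branch-driven two-accumulator single pass with sort-then-binary-search: the values are sorted once and each count is obtained as the width of the target's run, bisect_right minus bisect_left, computed by hand-written binary searches.
import Mathlib
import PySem

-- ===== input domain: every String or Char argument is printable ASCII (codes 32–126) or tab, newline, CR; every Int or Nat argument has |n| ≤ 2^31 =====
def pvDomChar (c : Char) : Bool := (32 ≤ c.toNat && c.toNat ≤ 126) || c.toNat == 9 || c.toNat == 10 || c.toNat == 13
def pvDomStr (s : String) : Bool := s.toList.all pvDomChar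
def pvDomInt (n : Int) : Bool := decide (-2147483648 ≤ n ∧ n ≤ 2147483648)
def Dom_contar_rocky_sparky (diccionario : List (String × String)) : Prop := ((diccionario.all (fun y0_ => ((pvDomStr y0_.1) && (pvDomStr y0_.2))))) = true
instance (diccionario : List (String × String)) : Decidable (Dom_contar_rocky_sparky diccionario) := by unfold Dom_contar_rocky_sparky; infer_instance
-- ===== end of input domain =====

-- B replaces A's branch-driven two-accumulator single pass by sort-then-binary-search:
-- sort the values once, then each count is bisect_right - bisect_left of the target. Alternative algorithm, same results.

-- ===== PORT A =====
-- A-side helper: the loop body of A's for-loop (acc = (contador_rocky, contador_sparky)).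
def rockyStep (acc : Int × Int) (kv : String × String) : Int × Int :=
  let elemento := kv.2
  if elemento == "Rocky" then (acc.1 + 1, acc.2)
  else if elemento == "Sparky" then (acc.1, acc.2 + 1)
  else acc

def contar_rocky_sparky (diccionario : List (String × String)) : String × String :=
  let p := diccionario.foldl rockyStep (0, 0)
  ("Rocky: " ++ PySem.Int.toStr p.1, "Sparky: " ++ PySem.Int.toStr p.2)

-- ===== PORT B =====
-- Source B's hand-written bl/br are verbatim the standard bisect_left/bisect_right loops,
-- which PySem.List.bisectLeft / bisectRight implement step for step (while lo<hi; mid=(lo+hi)//2; …).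
def contar_rocky_sparky_alt (diccionario : List (String × String)) : String × String :=
  let vals := PySem.List.sorted (diccionario.map Prod.snd) (fun v => v) false
  let r : Int := (PySem.List.bisectRight vals "Rocky" : Int) - (PySem.List.bisectLeft vals "Rocky" : Int)
  let s : Int := (PySem.List.bisectRight vals "Sparky" : Int) - (PySem.List.bisectLeft vals "Sparky" : Int)
  ("Rocky: " ++ PySem.Int.toStr r, "Sparky: " ++ PySem.Int.toStr s)

-- ===== PRECONDITION & SPEC =====
def Spec_contar_rocky_sparky (diccionario : List (String × String)) (out : String × String) : Prop := out = contar_rocky_sparky_alt diccionario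
instance (diccionario : List (String × String)) (out : String × String) : Decidable (Spec_contar_rocky_sparky diccionario out) := by unfold Spec_contar_rocky_sparky; infer_instance

-- ===== CLAIM =====
def Claim_equal_contar_rocky_sparky : Prop := ∀ (diccionario : List (String × String)), Dom_contar_rocky_sparky diccionario → Spec_contar_rocky_sparky diccionario (contar_rocky_sparky diccionario)

-- ===== LEMMAS AND PROOFS =====

-- A's fold counts occurrences of the two targets among the values.
lemma fold_counts (l : List (String × String)) (r s : Int) :
    l.foldl rockyStep (r, s)
      = (r + ((l.map Prod.snd).count "Rocky" : Int),
         s + ((l.map Prod.snd).count "Sparky" : Int)) := by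
  induction l generalizing r s with
  | nil => simp
  | cons kv t ih =>
    rw [List.foldl_cons, List.map_cons]
    by_cases h1 : kv.2 = "Rocky"
    · have e : rockyStep (r, s) kv = (r + 1, s) := by simp [rockyStep, h1]
      rw [e, ih]; simp [h1]; ring
    · by_cases h2 : kv.2 = "Sparky"
      · have e : rockyStep (r, s) kv = (r, s + 1) := by simp [rockyStep, h2]
        rw [e, ih]; simp [h2]; ring
      · have e : rockyStep (r, s) kv = (r, s) := by simp [rockyStep, h1, h2]
        rw [e, ih]; simp [h1, h2]

-- If a predicate on a list holds exactly at the indices below lo, then countP = lo.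
lemma countP_eq_of_index_cut (xs : List String) (p : String → Bool) (lo : Nat)
    (hlo : lo ≤ xs.length)
    (hcut : ∀ j (hj : j < xs.length), p xs[j] = decide (j < lo)) :
    xs.countP p = lo := by
  induction xs generalizing lo with
  | nil => simpa using (Nat.le_zero.mp hlo).symm
  | cons a t ih =>
    cases lo with
    | zero =>
      have h0 : ∀ j (hj : j < (a :: t).length), p (a :: t)[j] = false := by
        intro j hj; simpa using hcut j hj
      rw [List.countP_cons]
      have ha : p a = false := by simpa using h0 0 (by simp)
      have ht : t.countP p = 0 := by
        rw [List.countP_eq_zero]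
        intro x hx
        obtain ⟨j, hj, rfl⟩ := List.mem_iff_getElem.mp hx
        have := h0 (j+1) (by simpa using Nat.succ_lt_succ hj)
        simpa using this
      simp [ha, ht]
    | succ lo' =>
      have ha : p a = true := by simpa using hcut 0 (by simp)
      have ht : t.countP p = lo' := by
        apply ih lo' (by simpa using Nat.succ_le_succ_iff.mp hlo)
        intro j hj
        have := hcut (j+1) (by simpa using Nat.succ_lt_succ hj)
        simpa [Nat.succ_lt_succ_iff] using this
      rw [List.countP_cons]
      simp [ha, ht]

-- Invariant proof of the bisect_left fuel loop on a sorted String list.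
lemma bisectLeftLoop_spec (xs : List String) (x : String) (fuel lo hi : Nat)
    (hs : xs.Pairwise (· ≤ ·))
    (hfuel : hi - lo ≤ fuel) (hle : lo ≤ hi) (hhi : hi ≤ xs.length)
    (hbelow : ∀ j (hj : j < xs.length), j < lo → xs[j] < x)
    (habove : ∀ j (hj : j < xs.length), hi ≤ j → ¬ xs[j] < x) :
    PySem.List.bisectLeftLoop xs x fuel lo hi = xs.countP (fun v => decide (v < x)) := by
  induction fuel generalizing lo hi with
  | zero =>
    have : lo = hi := by omega
    subst this
    rw [PySem.List.bisectLeftLoop]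
    symm
    apply countP_eq_of_index_cut xs _ lo (le_trans hle hhi)
    intro j hj
    by_cases h : j < lo
    · simp [h, hbelow j hj h]
    · simp [h, habove j hj (by omega)]
  | succ fuel ih =>
    rw [PySem.List.bisectLeftLoop]
    by_cases hlh : lo < hi
    · have hmid : (lo + hi) / 2 < xs.length := by omega
      rw [if_pos hlh, List.getElem?_eq_getElem hmid]
      simp only
      set mid := (lo + hi) / 2 with hm
      have hmono := List.pairwise_iff_getElem.mp hs
      by_cases hy : xs[mid] < x
      · rw [if_pos hy]
        apply ih (mid + 1) hi (by omega) (by omega) hhi _ habove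
        intro j hj hjlt
        rcases Nat.lt_or_ge j mid with h | h
        · exact lt_of_le_of_lt (hmono j mid hj hmid h) hy
        · have : j = mid := by omega
          subst this; exact hy
      · rw [if_neg hy]
        apply ih lo mid (by omega) (by omega) (by omega) hbelow
        intro j hj hjge
        rcases Nat.lt_or_ge mid j with h | h
        · intro hc; exact hy (lt_of_le_of_lt (hmono mid j hmid hj h) hc)
        · have : j = mid := by omega
          subst this; exact hy
    · rw [if_neg hlh]
      have : lo = hi := by omega
      subst this
      symm
      apply countP_eq_of_index_cut xs _ lo (le_trans hle hhi)
      intro j hj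
      by_cases h : j < lo
      · simp [h, hbelow j hj h]
      · simp [h, habove j hj (by omega)]

-- Invariant proof of the bisect_right fuel loop on a sorted String list.
lemma bisectRightLoop_spec (xs : List String) (x : String) (fuel lo hi : Nat)
    (hs : xs.Pairwise (· ≤ ·))
    (hfuel : hi - lo ≤ fuel) (hle : lo ≤ hi) (hhi : hi ≤ xs.length)
    (hbelow : ∀ j (hj : j < xs.length), j < lo → xs[j] ≤ x)
    (habove : ∀ j (hj : j < xs.length), hi ≤ j → ¬ xs[j] ≤ x) :
    PySem.List.bisectRightLoop xs x fuel lo hi = xs.countP (fun v => decide (v ≤ x)) := by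
  induction fuel generalizing lo hi with
  | zero =>
    have : lo = hi := by omega
    subst this
    rw [PySem.List.bisectRightLoop]
    symm
    apply countP_eq_of_index_cut xs _ lo (le_trans hle hhi)
    intro j hj
    by_cases h : j < lo
    · simp [h, hbelow j hj h]
    · simp [h, habove j hj (by omega)]
  | succ fuel ih =>
    rw [PySem.List.bisectRightLoop]
    by_cases hlh : lo < hi
    · have hmid : (lo + hi) / 2 < xs.length := by omega
      rw [if_pos hlh, List.getElem?_eq_getElem hmid]
      simp only
      set mid := (lo + hi) / 2 with hm
      have hmono := List.pairwise_iff_getElem.mp hs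
      by_cases hy : x < xs[mid]
      · rw [if_pos hy]
        apply ih lo mid (by omega) (by omega) (by omega) hbelow
        intro j hj hjge
        rcases Nat.lt_or_ge mid j with h | h
        · intro hc; exact absurd (le_trans (hmono mid j hmid hj h) hc) (not_le.mpr hy)
        · have : j = mid := by omega
          subst this; exact not_le.mpr hy
      · rw [if_neg hy]
        apply ih (mid + 1) hi (by omega) (by omega) hhi _ habove
        intro j hj hjlt
        rcases Nat.lt_or_ge j mid with h | h
        · exact le_trans (hmono j mid hj hmid h) (not_lt.mp hy)
        · have : j = mid := by omega
          subst this; exact not_lt.mp hy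
    · rw [if_neg hlh]
      have : lo = hi := by omega
      subst this
      symm
      apply countP_eq_of_index_cut xs _ lo (le_trans hle hhi)
      intro j hj
      by_cases h : j < lo
      · simp [h, hbelow j hj h]
      · simp [h, habove j hj (by omega)]

lemma bisectLeft_eq_countP (xs : List String) (x : String) (hs : xs.Pairwise (· ≤ ·)) :
    PySem.List.bisectLeft xs x = xs.countP (fun v => decide (v < x)) := by
  apply bisectLeftLoop_spec xs x xs.length 0 xs.length hs (by omega) (by omega) le_rfl
  · intro j hj h; omega
  · intro j hj h; omega

lemma bisectRight_eq_countP (xs : List String) (x : String) (hs : xs.Pairwise (· ≤ ·)) :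
    PySem.List.bisectRight xs x = xs.countP (fun v => decide (v ≤ x)) := by
  apply bisectRightLoop_spec xs x xs.length 0 xs.length hs (by omega) (by omega) le_rfl
  · intro j hj h; omega
  · intro j hj h; omega

-- countP(≤ x) splits into countP(< x) plus the number of exact hits.
lemma countP_le_split (l : List String) (x : String) :
    l.countP (fun v => decide (v ≤ x)) = l.countP (fun v => decide (v < x)) + l.count x := by
  induction l with
  | nil => simp
  | cons a t ih =>
    rw [List.countP_cons, List.countP_cons, List.count_cons]
    rcases lt_trichotomy a x with h | h | h
    · rw [if_pos (decide_eq_true (le_of_lt h)), if_pos (decide_eq_true h),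
        if_neg (by simp [LT.lt.ne h]), ih]
      omega
    · subst h
      rw [if_pos (decide_eq_true le_rfl), if_neg (by simp), if_pos (by simp), ih]
      omega
    · rw [if_neg (by simp [not_le.mpr h]), if_neg (by simp [not_lt.mpr (le_of_lt h)]),
        if_neg (by simp [LT.lt.ne' h]), ih]
      omega

-- The run width read off the sorted values is the plain count of x among the values.
lemma bisect_diff_eq_count (vals : List String) (x : String) :
    ((PySem.List.bisectRight (PySem.List.sorted vals (fun v => v) false) x : Int)
      - (PySem.List.bisectLeft (PySem.List.sorted vals (fun v => v) false) x : Int))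
      = (vals.count x : Int) := by
  set s := PySem.List.sorted vals (fun v => v) false with hsdef
  have hs : s.Pairwise (· ≤ ·) := PySem.List.sorted_pairwise vals (fun v => v)
  have hperm : s.Perm vals := PySem.List.sorted_perm vals (fun v => v) false
  rw [bisectLeft_eq_countP s x hs, bisectRight_eq_countP s x hs, countP_le_split]
  have : s.count x = vals.count x := hperm.count_eq x
  rw [this]
  push_cast
  omega

-- ===== VERDICT =====
theorem contar_rocky_sparky_spec : Claim_equal_contar_rocky_sparky := by
  intro d _
  unfold Spec_contar_rocky_sparky contar_rocky_sparky contar_rocky_sparky_alt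
  rw [show d.foldl rockyStep (0, 0) = _ from fold_counts d 0 0]
  simp only [bisect_diff_eq_count]
  simp
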